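-- pv_equiv track=rewrite | github.com/shaolinpat/hl7_fhir_tool | tools/uniq_cov.py | choose_redundant
-- ===== SOURCE A (Python) =====
-- def choose_redundant(
--     per_test_lines: dict[str, set[int]],
-- ) -> tuple[list[str], list[str]]:
--     nodes = list(per_test_lines.keys())
--     keepers: list[str] = []
--     redundant: list[str] = []
--     for i, nid in enumerate(nodes):
--         covered = per_test_lines[nid]
--         if not covered:
--             redundant.append(nid)
--             continue
--         union_other = set()
--         for j, other in enumerate(nodes):
--             if i == j:
--                 continue
--             union_other |= per_test_lines[other]
--         if covered.issubset(union_other):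
--             redundant.append(nid)
--         else:
--             keepers.append(nid)
--     return keepers, redundant
-- ===== SOURCE B (Python) =====
-- def choose_redundant(
--     per_test_lines: dict[str, set[int]],
-- ) -> tuple[list[str], list[str]]:
--     counts: dict[int, int] = {}
--     for lines in per_test_lines.values():
--         for ln in lines:
--             counts[ln] = counts.get(ln, 0) + 1
--     keepers: list[str] = []
--     redundant: list[str] = []
--     for nid, lines in per_test_lines.items():
--         if all(counts[ln] >= 2 for ln in lines):
--             redundant.append(nid)
--         else:
--             keepers.append(nid)
--     return keepers, redundant
-- ===== Notes on version B (the rewrite author's own statement) =====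
-- stated objective: faster
-- what changed: Instead of re-building the union of all other tests' covered lines for every node (quadratic in the number of tests), B builds one global per-line coverage counter in a single pass and marks a node redundant iff every one of its lines is covered at least twice.
import Mathlib
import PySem

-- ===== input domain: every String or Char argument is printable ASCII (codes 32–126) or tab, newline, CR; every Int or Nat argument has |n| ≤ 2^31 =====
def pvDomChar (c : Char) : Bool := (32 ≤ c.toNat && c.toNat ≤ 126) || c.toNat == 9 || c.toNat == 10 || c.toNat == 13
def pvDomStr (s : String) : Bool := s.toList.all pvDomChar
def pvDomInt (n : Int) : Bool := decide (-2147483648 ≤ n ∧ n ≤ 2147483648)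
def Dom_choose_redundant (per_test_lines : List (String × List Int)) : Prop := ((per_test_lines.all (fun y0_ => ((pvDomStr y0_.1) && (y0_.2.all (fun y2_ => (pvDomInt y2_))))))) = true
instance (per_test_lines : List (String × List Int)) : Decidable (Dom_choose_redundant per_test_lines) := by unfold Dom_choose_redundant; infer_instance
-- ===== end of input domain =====

-- B replaces A's per-node re-union of all other tests by one global per-line coverage
-- counter (a node is redundant iff each of its lines is covered at least twice).

-- ===== PORT A =====
-- literal transliteration of A: for each node, union the coverage sets of all OTHER
-- nodes and test subset inclusion; results appended at the back as Python's .append.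
def choose_redundant (per_test_lines : List (String × List Int)) : List String × List String :=
  let d := PySem.Dict.mk per_test_lines
  let nodes := PySem.Dict.keys d
  (PySem.List.enumerate nodes).foldl
    (fun (acc : List String × List String) (p : Int × String) =>
      let i := p.1
      let nid := p.2
      let covered := d.getD nid []
      if covered = [] then (acc.1, acc.2 ++ [nid])
      else
        let union_other := (PySem.List.enumerate nodes).foldl
          (fun (u : PySem.Set Int) (q : Int × String) =>
            if i == q.1 then u else PySem.Set.union u (d.getD q.2 []))
          PySem.Set.empty
        if PySem.Set.issubset covered union_other then (acc.1, acc.2 ++ [nid])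
        else (acc.1 ++ [nid], acc.2))
    ([], [])

-- ===== PORT B =====
-- literal transliteration of B (Source B): build a per-line counter in one pass, then
-- classify each node by whether all of its lines have count ≥ 2.
def choose_redundant_alt (per_test_lines : List (String × List Int)) : List String × List String :=
  let counts : PySem.Dict Int Int :=
    per_test_lines.foldl
      (fun d p => p.2.foldl (fun d ln => d.insert ln (d.getD ln 0 + 1)) d)
      PySem.Dict.empty
  per_test_lines.foldl
    (fun (acc : List String × List String) p =>
      if p.2.all (fun ln => decide (2 ≤ counts.getD ln 0)) then
        (acc.1, acc.2 ++ [p.1])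
      else (acc.1 ++ [p.1], acc.2))
    ([], [])


-- ===== PRECONDITION & SPEC =====
-- Pre_ is the representation invariant of the Python argument dict[str, set[int]]:
-- the association list stands for a dict (distinct keys) and each value for a set
-- (distinct elements); it excludes no actual Python input.
def Pre_choose_redundant (per_test_lines : List (String × List Int)) : Prop :=
  (per_test_lines.map (·.1)).Nodup ∧ ∀ p ∈ per_test_lines, p.2.Nodup
instance (per_test_lines : List (String × List Int)) : Decidable (Pre_choose_redundant per_test_lines) := by unfold Pre_choose_redundant; infer_instance
def pvWitness_choose_redundant : (List (String × List Int)) := [("t1", [1, 2]), ("t2", [2]), ("t3", [])]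

def Spec_choose_redundant (per_test_lines : List (String × List Int)) (out : List String × List String) : Prop := out = choose_redundant_alt per_test_lines
instance (per_test_lines : List (String × List Int)) (out : List String × List String) : Decidable (Spec_choose_redundant per_test_lines out) := by unfold Spec_choose_redundant; infer_instance

-- ===== CLAIM (what is proved, stated in full; the proofs are below) =====
def Claim_equal_choose_redundant : Prop := ∀ (per_test_lines : List (String × List Int)), Dom_choose_redundant per_test_lines → Pre_choose_redundant per_test_lines → Spec_choose_redundant per_test_lines (choose_redundant per_test_lines)

-- ===== LEMMAS AND PROOFS =====

theorem getD_mk_of_mem {ptl : List (String × List Int)}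
    (hk : (ptl.map (·.1)).Nodup) {p : String × List Int} (hp : p ∈ ptl) :
    (PySem.Dict.mk ptl).getD p.1 [] = p.2 := by
  induction ptl with
  | nil => simp at hp
  | cons h t ih =>
    obtain ⟨k, v⟩ := h
    simp only [List.map_cons, List.nodup_cons, List.mem_map] at hk
    simp only [PySem.Dict.getD, PySem.Dict.get?_mk_cons]
    rcases List.mem_cons.mp hp with rfl | hp'
    · simp
    · have hne : k ≠ p.1 := fun he => hk.1 ⟨p, hp', he.symm⟩
      rw [if_neg (by simpa using hne)]
      exact ih hk.2 hp'

theorem counts_aux (ptl : List (String × List Int)) (v : Int) :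
    ∀ d : PySem.Dict Int Int,
    (ptl.foldl (fun d p => p.2.foldl (fun d ln => d.insert ln (d.getD ln 0 + 1)) d) d).getD v 0
      = d.getD v 0 + ((ptl.map (fun p => (p.2.count v : Int))).sum) := by
  induction ptl with
  | nil => simp
  | cons h t ih =>
    intro d
    simp only [List.foldl_cons, List.map_cons, List.sum_cons]
    rw [ih, PySem.Dict.getD_foldl_insert_add_one]
    ring

theorem counts_getD (ptl : List (String × List Int))
    (hv : ∀ p ∈ ptl, p.2.Nodup) (v : Int) :
    (ptl.foldl (fun d p => p.2.foldl (fun d ln => d.insert ln (d.getD ln 0 + 1)) d)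
        PySem.Dict.empty).getD v 0
      = (ptl.countP (fun p => decide (v ∈ p.2)) : Int) := by
  rw [counts_aux]
  have hz : (PySem.Dict.empty : PySem.Dict Int Int).getD v 0 = 0 := by
    simp [PySem.Dict.getD, PySem.Dict.empty, PySem.Dict.get?]
  rw [hz, zero_add]
  induction ptl with
  | nil => simp
  | cons h t ih =>
    simp only [List.map_cons, List.sum_cons, List.countP_cons]
    have h1 : (h.2.count v : Int) = if v ∈ h.2 then 1 else 0 := by
      by_cases hm : v ∈ h.2
      · simp [hm, List.count_eq_one_of_mem (hv h List.mem_cons_self) hm]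
      · simp [hm, List.count_eq_zero_of_not_mem hm]
    rw [h1, ih (fun p hp => hv p (List.mem_cons_of_mem h hp))]
    by_cases hm : v ∈ h.2
    · simp [hm]
      ring
    · simp [hm]

theorem mem_unionFold (pairs : List (Int × (String × List Int))) (d : PySem.Dict String (List Int))
    (i : Int) (l : Int) :
    ∀ s : PySem.Set Int,
    (l ∈ pairs.foldl
        (fun (u : PySem.Set Int) (q : Int × (String × List Int)) =>
          if i == q.1 then u else PySem.Set.union u (d.getD q.2.1 []))
        s)
      ↔ l ∈ s ∨ ∃ q ∈ pairs, i ≠ q.1 ∧ l ∈ d.getD q.2.1 [] := by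
  induction pairs with
  | nil => simp
  | cons h t ih =>
    intro s
    simp only [List.foldl_cons]
    by_cases he : i = h.1
    · rw [if_pos (by simpa using he), ih]
      constructor
      · rintro (hs | ⟨q, hq, hne, hm⟩)
        · exact Or.inl hs
        · exact Or.inr ⟨q, List.mem_cons_of_mem h hq, hne, hm⟩
      · rintro (hs | ⟨q, hq, hne, hm⟩)
        · exact Or.inl hs
        · rcases List.mem_cons.mp hq with rfl | hq'
          · exact absurd he hne
          · exact Or.inr ⟨q, hq', hne, hm⟩
    · rw [if_neg (by simpa using he), ih]
      simp only [PySem.Set.mem_union]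
      constructor
      · rintro (⟨hs | hm⟩ | ⟨q, hq, hne, hm⟩)
        · exact Or.inl hs
        · exact Or.inr ⟨h, List.mem_cons_self, he, hm⟩
        · exact Or.inr ⟨q, List.mem_cons_of_mem h hq, hne, hm⟩
      · rintro (hs | ⟨q, hq, hne, hm⟩)
        · exact Or.inl (Or.inl hs)
        · rcases List.mem_cons.mp hq with rfl | hq'
          · exact Or.inl (Or.inr hm)
          · exact Or.inr ⟨q, hq', hne, hm⟩

theorem two_le_countP_iff {α : Type} [DecidableEq α] (xs : List α) (hnd : xs.Nodup)
    (pred : α → Bool) (k : Nat) (hk : k < xs.length) (hpk : pred xs[k] = true) :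
    2 ≤ xs.countP pred ↔ ∃ (k' : Nat) (_ : k' < xs.length), k' ≠ k ∧ pred xs[k'] = true := by
  rw [List.countP_eq_length_filter]
  have hmemf : xs[k] ∈ xs.filter pred := List.mem_filter.mpr ⟨List.getElem_mem hk, hpk⟩
  have hndf : (xs.filter pred).Nodup := hnd.filter pred
  constructor
  · intro h2
    have hlen : 1 ≤ ((xs.filter pred).erase xs[k]).length := by
      rw [List.length_erase_of_mem hmemf]; omega
    obtain ⟨b, hb⟩ := List.exists_mem_of_length_pos (show 0 < ((xs.filter pred).erase xs[k]).length by omega)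
    obtain ⟨hbne, hbmem⟩ := (List.Nodup.mem_erase_iff hndf).mp hb
    have hbx : b ∈ xs := (List.mem_filter.mp hbmem).1
    obtain ⟨k', hk', hbk'⟩ := List.getElem_of_mem hbx
    refine ⟨k', hk', ?_, by rw [hbk']; exact (List.mem_filter.mp hbmem).2⟩
    intro he; subst he; rw [hbk'] at hbne; exact hbne rfl
  · rintro ⟨k', hk', hne, hpk'⟩
    have hmemf' : xs[k'] ∈ xs.filter pred := List.mem_filter.mpr ⟨List.getElem_mem hk', hpk'⟩
    have hnev : xs[k'] ≠ xs[k] := fun he => hne ((List.Nodup.getElem_inj_iff hnd).mp he)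
    have hin : xs[k'] ∈ (xs.filter pred).erase xs[k] := (List.Nodup.mem_erase_iff hndf).mpr ⟨hnev, hmemf'⟩
    have h1 := List.length_pos_of_mem hin
    have := List.length_erase_of_mem hmemf
    omega

theorem enumerate_map {α β : Type} (f : α → β) (l : List α) (s : Int) :
    PySem.List.enumerate (l.map f) s = (PySem.List.enumerate l s).map (fun q => (q.1, f q.2)) := by
  induction l generalizing s with
  | nil => simp [PySem.List.enumerate]
  | cons h t ih => simp [PySem.List.enumerate_cons, ih]

theorem foldl_enumerate_snd {α β : Type} (l : List α) (g : β → α → β) (init : β) :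
    (PySem.List.enumerate l 0).foldl (fun a q => g a q.2) init = l.foldl g init := by
  rw [← List.foldl_map, PySem.List.map_snd_enumerate]

theorem choose_redundant_eq_alt (ptl : List (String × List Int))
    (hk : (ptl.map (·.1)).Nodup) (hv : ∀ p ∈ ptl, p.2.Nodup) :
    choose_redundant ptl = choose_redundant_alt ptl := by
  unfold choose_redundant choose_redundant_alt
  simp only [PySem.Dict.keys_mk, enumerate_map, List.foldl_map]
  conv_rhs => rw [← foldl_enumerate_snd ptl]
  apply PySem.List.foldl_congr_mem
  intro acc q hq
  obtain ⟨k, hklen, rfl⟩ := (PySem.List.mem_enumerate_iff _ _ _).mp hq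
  simp only [zero_add]
  have hmem : ptl[k] ∈ ptl := List.getElem_mem hklen
  have hcov : (PySem.Dict.mk ptl).getD ptl[k].1 [] = ptl[k].2 := getD_mk_of_mem hk hmem
  rw [hcov]
  have hnd : ptl.Nodup := hk.of_map
  have hU : ∀ l : Int,
      (l ∈ (PySem.List.enumerate ptl 0).foldl
        (fun (u : PySem.Set Int) (q : Int × (String × List Int)) =>
          if (k : Int) == q.1 then u else PySem.Set.union u ((PySem.Dict.mk ptl).getD q.2.1 []))
        PySem.Set.empty)
      ↔ ∃ (k' : Nat) (_ : k' < ptl.length), k' ≠ k ∧ l ∈ ptl[k'].2 := by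
    intro l
    rw [mem_unionFold]
    simp only [PySem.Set.empty, List.not_mem_nil, false_or]
    constructor
    · rintro ⟨q, hq', hne, hm⟩
      obtain ⟨k', hk'len, rfl⟩ := (PySem.List.mem_enumerate_iff _ _ _).mp hq'
      simp only [zero_add] at hne hm
      rw [getD_mk_of_mem hk (List.getElem_mem hk'len)] at hm
      exact ⟨k', hk'len, fun he => hne (by rw [he]), hm⟩
    · rintro ⟨k', hk'len, hne, hm⟩
      refine ⟨((k' : Int), ptl[k']), ?_, ?_, ?_⟩
      · exact (PySem.List.mem_enumerate_iff _ _ _).mpr ⟨k', hk'len, by simp⟩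
      · simpa using fun he => hne (by exact_mod_cast he.symm)
      · rw [getD_mk_of_mem hk (List.getElem_mem hk'len)]; exact hm
  by_cases hemp : ptl[k].2 = []
  · rw [if_pos hemp, hemp]
    simp
  · rw [if_neg hemp]
    have hcond :
        PySem.Set.issubset ptl[k].2
          ((PySem.List.enumerate ptl 0).foldl
            (fun (u : PySem.Set Int) (q : Int × (String × List Int)) =>
              if (k : Int) == q.1 then u else PySem.Set.union u ((PySem.Dict.mk ptl).getD q.2.1 []))
            PySem.Set.empty)
        = ptl[k].2.all (fun ln => decide (2 ≤
            ((ptl.foldl (fun d p => p.2.foldl (fun d ln => d.insert ln (d.getD ln 0 + 1)) d)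
              PySem.Dict.empty : PySem.Dict Int Int)).getD ln 0)) := by
      have hpt : ∀ ln ∈ ptl[k].2,
          ((PySem.Set.contains ((PySem.List.enumerate ptl 0).foldl
            (fun (u : PySem.Set Int) (q : Int × (String × List Int)) =>
              if (k : Int) == q.1 then u else PySem.Set.union u ((PySem.Dict.mk ptl).getD q.2.1 []))
            PySem.Set.empty) ln) = true ↔ (decide (2 ≤
            ((ptl.foldl (fun d p => p.2.foldl (fun d ln => d.insert ln (d.getD ln 0 + 1)) d)
              PySem.Dict.empty : PySem.Dict Int Int)).getD ln 0)) = true) := by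
        intro ln hln
        simp only [counts_getD ptl hv]
        have hiff := two_le_countP_iff ptl hnd (fun p => decide (ln ∈ p.2)) k hklen (by simpa using hln)
        simp only [decide_eq_true_eq] at hiff ⊢
        rw [show ((2 : Int) ≤ (ptl.countP (fun p => decide (ln ∈ p.2)) : Int)) ↔
            2 ≤ ptl.countP (fun p => decide (ln ∈ p.2)) from by exact_mod_cast Iff.rfl, hiff]
        simp only [PySem.Set.contains]
        rw [List.contains_iff_mem]
        exact hU ln
      rw [Bool.eq_iff_iff]
      simp only [PySem.Set.issubset, List.all_eq_true]
      constructor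
      · intro h ln hln; exact (hpt ln hln).mp (h ln hln)
      · intro h ln hln; exact (hpt ln hln).mpr (h ln hln)
    rw [hcond]

-- ===== VERDICT (by name: the statement is the Claim_ definition above) =====
theorem choose_redundant_spec : Claim_equal_choose_redundant := by
  intro ptl _ hpre
  unfold Spec_choose_redundant
  exact choose_redundant_eq_alt ptl hpre.1 hpre.2
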